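-- pv_equiv track=rewrite | github.com/willdunklin/wordle_solver | wordle.py | wordle_str_hash
-- ===== SOURCE A (Python) =====
-- def wordle_str_hash(wordle_string) -> int:
--     word_hash = 0
--     three_pows = [1, 3, 9, 27, 81]
--     for x, char in zip(three_pows, wordle_string):
--         if char == 'g':
--             word_hash += x * 2
--         elif char == 'y':
--             word_hash += x
--     return word_hash
-- ===== SOURCE B (Python) =====
-- def wordle_str_hash(wordle_string) -> int:
--     word_hash = 0
--     for char in reversed(wordle_string[:5]):
--         word_hash = word_hash * 3 + (2 if char == 'g' else 1 if char == 'y' else 0)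
--     return word_hash
-- ===== Notes on version B (the rewrite author's own statement) =====
-- stated objective: simpler
-- what changed: Replaced the precomputed powers-of-three table zipped with the string by Horner's method over the reversed first five characters, keeping only a running accumulator.
import Mathlib
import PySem

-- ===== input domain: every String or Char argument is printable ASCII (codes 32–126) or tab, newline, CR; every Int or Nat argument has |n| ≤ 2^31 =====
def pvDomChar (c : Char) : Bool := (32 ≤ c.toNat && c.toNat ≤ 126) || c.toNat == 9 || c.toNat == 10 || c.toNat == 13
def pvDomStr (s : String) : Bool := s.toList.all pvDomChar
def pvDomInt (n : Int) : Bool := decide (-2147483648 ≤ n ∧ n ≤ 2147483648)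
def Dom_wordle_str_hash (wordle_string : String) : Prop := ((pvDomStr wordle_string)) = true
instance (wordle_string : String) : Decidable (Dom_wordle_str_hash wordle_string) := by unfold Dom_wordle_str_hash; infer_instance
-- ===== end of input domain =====

-- B replaces A's zipped powers-of-three table with Horner's method over the reversed first five characters (simpler decomposition, same cost).


-- ===== PORT A =====
-- for x, char in zip(three_pows, wordle_string): accumulate word_hash
def wordle_str_hash (wordle_string : String) : Int :=
  (List.zip ([1, 3, 9, 27, 81] : List Int) wordle_string.toList).foldl
    (fun word_hash p =>
      if p.2 = 'g' then word_hash + p.1 * 2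
      else if p.2 = 'y' then word_hash + p.1
      else word_hash) 0

-- ===== PORT B =====
-- Horner over reversed(wordle_string[:5])
def wordle_str_hash_alt (wordle_string : String) : Int :=
  ((PySem.List.slice wordle_string.toList none (some 5)).reverse).foldl
    (fun word_hash char =>
      word_hash * 3 + (if char = 'g' then 2 else if char = 'y' then 1 else 0)) 0

-- ===== PRECONDITION & SPEC =====
def Spec_wordle_str_hash (wordle_string : String) (out : Int) : Prop := out = wordle_str_hash_alt wordle_string
instance (wordle_string : String) (out : Int) : Decidable (Spec_wordle_str_hash wordle_string out) := by unfold Spec_wordle_str_hash; infer_instance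

-- ===== CLAIM (what is proved, stated in full; the proofs are below) =====
def Claim_equal_wordle_str_hash : Prop := ∀ (wordle_string : String), Dom_wordle_str_hash wordle_string → Spec_wordle_str_hash wordle_string (wordle_str_hash wordle_string)

-- ===== LEMMAS AND PROOFS =====

def cv (c : Char) : Int := if c = 'g' then 2 else if c = 'y' then 1 else 0

theorem stepA (h x : Int) (c : Char) :
    (if c = 'g' then h + x * 2 else if c = 'y' then h + x else h) = h + x * cv c := by
  unfold cv; split_ifs <;> ring

theorem stepB (c : Char) :
    (if c = 'g' then (2 : Int) else if c = 'y' then 1 else 0) = cv c := rfl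

theorem wordle_str_hash_list (l : List Char) :
    (List.zip ([1, 3, 9, 27, 81] : List Int) l).foldl
      (fun word_hash p =>
        if p.2 = 'g' then word_hash + p.1 * 2
        else if p.2 = 'y' then word_hash + p.1
        else word_hash) 0
    = ((l.take 5).reverse).foldl
        (fun word_hash char =>
          word_hash * 3 + (if char = 'g' then 2 else if char = 'y' then 1 else 0)) 0 := by
  rcases l with _ | ⟨a, _ | ⟨b, _ | ⟨c, _ | ⟨d, _ | ⟨e, rest⟩⟩⟩⟩⟩ <;>
    simp only [List.zip, List.zipWith, List.take, List.reverse, List.reverseAux, List.foldl,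
      stepA, stepB] <;> ring

-- ===== VERDICT (by name: the statement is the Claim_ definition above) =====
theorem wordle_str_hash_spec : Claim_equal_wordle_str_hash := by
  intro s _
  unfold Spec_wordle_str_hash wordle_str_hash wordle_str_hash_alt
  have h5 : PySem.List.slice s.toList none (some 5) = s.toList.take (5 : Int).toNat :=
    PySem.List.slice_to _ (by norm_num)
  rw [h5]
  exact wordle_str_hash_list s.toList
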